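-- pv_equiv track=rewrite | github.com/pvdwijdeven/DSA_Python3 | G4G/DSA Course/BinaryOperations/BinaryOperations.py | get_right_most_set_bit
-- ===== SOURCE A (Python) =====
-- def get_right_most_set_bit(n) -> int:
--     if n == 0:
--         return 0
--     bit = 1
--     while not n & 1:
--         bit += 1
--         n = n >> 1
--     return bit
-- ===== SOURCE B (Python) =====
-- def get_right_most_set_bit(n) -> int:
--     return (n & -n).bit_length()
-- ===== Notes on version B (the rewrite author's own statement) =====
-- stated objective: idiomatic
-- what changed: Replaces the bit-by-bit shifting loop with the closed form (n & -n).bit_length(), which isolates the lowest set bit arithmetically and reads off its position with a builtin; no loop state at all.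
import Mathlib
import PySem

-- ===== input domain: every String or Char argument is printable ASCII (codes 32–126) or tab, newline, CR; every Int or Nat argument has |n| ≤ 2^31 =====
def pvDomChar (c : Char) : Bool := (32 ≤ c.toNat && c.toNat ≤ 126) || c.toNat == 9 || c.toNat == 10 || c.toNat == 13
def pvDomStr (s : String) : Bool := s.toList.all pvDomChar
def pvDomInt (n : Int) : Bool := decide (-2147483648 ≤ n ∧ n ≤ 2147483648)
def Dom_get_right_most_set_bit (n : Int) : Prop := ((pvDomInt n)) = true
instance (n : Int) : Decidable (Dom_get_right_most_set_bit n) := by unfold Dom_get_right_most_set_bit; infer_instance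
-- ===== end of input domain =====

-- B replaces A's bit-by-bit shifting loop with the closed form (n & -n).bit_length() (idiomatic, no loop).


-- ===== PORT A =====
-- 'while not n & 1: bit += 1; n = n >> 1' — carried nonzero invariant gives termination (natAbs halves).
def grmsbLoop (bit : Int) (n : Int) (hn : n ≠ 0) : Int :=
  if h : PySem.Int.band n 1 = 0 then
    grmsbLoop (bit + 1) (n >>> (1 : Nat))
      (by
        rw [PySem.Int.band_one, PySem.Int.mod_eq_zero_iff_dvd] at h
        obtain ⟨c, hc⟩ := h
        have h2 : n >>> (1:Nat) = n / 2 := by simpa using Int.shiftRight_eq_div_pow n 1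
        rw [h2]; omega)
  else bit
termination_by n.natAbs
decreasing_by
  rw [PySem.Int.band_one, PySem.Int.mod_eq_zero_iff_dvd] at h
  obtain ⟨c, hc⟩ := h
  have h2 : n >>> (1:Nat) = n / 2 := by simpa using Int.shiftRight_eq_div_pow n 1
  rw [h2]; omega

def get_right_most_set_bit (n : Int) : Int :=
  if h : n = 0 then 0 else grmsbLoop 1 n h

-- ===== PORT B =====
def get_right_most_set_bit_alt (n : Int) : Int :=
  ((PySem.Int.bitLength (PySem.Int.band n (-n)) : Nat) : Int)

-- ===== PRECONDITION & SPEC =====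
def Spec_get_right_most_set_bit (n : Int) (out : Int) : Prop := out = get_right_most_set_bit_alt n
instance (n : Int) (out : Int) : Decidable (Spec_get_right_most_set_bit n out) := by unfold Spec_get_right_most_set_bit; infer_instance

-- ===== CLAIM (what is proved, stated in full; the proofs are below) =====
def Claim_equal_get_right_most_set_bit : Prop := ∀ (n : Int), Dom_get_right_most_set_bit n → Spec_get_right_most_set_bit n (get_right_most_set_bit n)

-- ===== LEMMAS AND PROOFS =====

-- a Nat '&&&' splits into the low bit and the rest
theorem pv_land_bit (a b : Bool) (m n : Nat) :
    (Nat.bit a m) &&& (Nat.bit b n) = Nat.bit (a && b) (m &&& n) := by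
  simp [HAnd.hAnd, AndOp.and, Nat.land, Nat.bitwise_bit]

-- odd m: m &&& (m-1) clears the low bit
theorem pv_land_pred_odd (k : Nat) : (2*k+1) &&& (2*k) = 2*k := by
  have h := pv_land_bit true false k k
  simpa [Nat.bit] using h

-- even m: m &&& (m-1) halves
theorem pv_land_pred_even (k : Nat) (hk : 0 < k) :
    (2*k) &&& (2*k - 1) = 2 * (k &&& (k-1)) := by
  have h := pv_land_bit false true k (k-1)
  have e1 : Nat.bit false k = 2*k := by simp only [Nat.bit, Bool.cond_false]
  have e2 : Nat.bit true (k-1) = 2*k - 1 := by simp only [Nat.bit, Bool.cond_true]; omega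
  have e3 : Nat.bit false (k &&& (k-1)) = 2*(k &&& (k-1)) := by
    simp only [Nat.bit, Bool.cond_false]
  simp only [Bool.false_and] at h
  rw [e1, e2, e3] at h
  exact h

-- lowbit of a positive Nat is positive
theorem pv_lowbit_pos (m : Nat) (hm : 0 < m) : 0 < m - (m &&& (m-1)) := by
  have := Nat.and_le_right (n := m) (m := m - 1)
  omega

-- band n (-n) computes the Nat lowbit of |n|
theorem pv_band_neg_self (n : Int) (hn : n ≠ 0) :
    PySem.Int.band n (-n) = ((n.natAbs - (n.natAbs &&& (n.natAbs - 1)) : Nat) : Int) := by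
  rcases lt_or_gt_of_ne hn with hneg | hpos
  · rw [PySem.Int.band]
    have h1 : ¬ (0 ≤ n) := by omega
    have h2 : (0:Int) ≤ -n := by omega
    simp only [h1, h2, if_true, if_false]
    have e1 : (-n).toNat = n.natAbs := by omega
    have e2 : (-n - 1).toNat = n.natAbs - 1 := by omega
    rw [e1, e2]
  · rw [PySem.Int.band]
    have h1 : (0:Int) ≤ n := by omega
    have h2 : ¬ ((0:Int) ≤ -n) := by omega
    simp only [h1, h2, if_true, if_false, neg_neg]
    have e1 : n.toNat = n.natAbs := by omega
    have e2 : (n - 1).toNat = n.natAbs - 1 := by omega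
    rw [e1, e2]

-- the loop computes bit - 1 + bit_length(lowbit |n|)
theorem pv_grmsbLoop_eq (m : Nat) : ∀ (n : Int) (hn : n ≠ 0), n.natAbs = m → ∀ (bit : Int),
    grmsbLoop bit n hn = bit - 1 + ((PySem.Int.bitLength (PySem.Int.band n (-n)) : Nat) : Int) := by
  induction m using Nat.strong_induction_on with
  | _ m ih =>
    intro n hn hm bit
    rw [grmsbLoop.eq_def]
    by_cases h : PySem.Int.band n 1 = 0
    · -- even case: one shift, then the inductive hypothesis
      rw [dif_pos h]
      have h' := h
      rw [PySem.Int.band_one, PySem.Int.mod_eq_zero_iff_dvd] at h'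
      obtain ⟨c, hc⟩ := h'
      have hshift : n >>> (1:Nat) = n / 2 := by simpa using Int.shiftRight_eq_div_pow n 1
      have hc' : n / 2 = c := by omega
      have hsne : n >>> (1:Nat) ≠ 0 := by rw [hshift, hc']; omega
      have hnac : c.natAbs < m := by omega
      rw [ih c.natAbs hnac (n >>> (1:Nat)) hsne (by rw [hshift, hc']) (bit + 1)]
      have hb1 := pv_band_neg_self n hn
      have hb2 := pv_band_neg_self (n >>> (1:Nat)) hsne
      rw [hb1, hb2]
      have hnac2 : (n >>> (1:Nat)).natAbs = c.natAbs := by rw [hshift, hc']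
      have hna : n.natAbs = 2 * c.natAbs := by omega
      rw [hna, hnac2]
      set k := c.natAbs with hk
      have hkpos : 0 < k := by omega
      have hlow : (2*k) - ((2*k) &&& (2*k - 1)) = 2 * (k - (k &&& (k-1))) := by
        rw [pv_land_pred_even k hkpos]
        have := Nat.and_le_right (n := k) (m := k - 1)
        omega
      rw [hlow]
      have hlp := pv_lowbit_pos k hkpos
      have hhalf := PySem.Int.bitLength_natCast (m := 2 * (k - (k &&& (k-1)))) (by omega)
      have he : (2 * (k - (k &&& (k-1)))) / 2 = k - (k &&& (k-1)) := by omega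
      rw [he] at hhalf
      rw [hhalf]
      push_cast
      ring
    · -- odd case: loop stops; the lowbit is 1
      rw [dif_neg h]
      rw [PySem.Int.band_one] at h
      have hmod : PySem.Int.mod n 2 = n % 2 := PySem.Int.mod_eq_emod_of_pos (by omega)
      rw [hmod] at h
      obtain ⟨k, hk⟩ : ∃ k, n.natAbs = 2*k+1 := ⟨n.natAbs / 2, by omega⟩
      rw [pv_band_neg_self n hn, hk]
      have hone : (2*k+1) - ((2*k+1) &&& (2*k+1-1)) = 1 := by
        have h2 : 2*k+1-1 = 2*k := by omega
        rw [h2, pv_land_pred_odd]; omega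
      rw [hone]
      have hb1 : PySem.Int.bitLength ((1:Nat) : Int) = 1 := by decide
      rw [hb1]
      omega

-- ===== VERDICT (by name: the statement is the Claim_ definition above) =====
theorem get_right_most_set_bit_spec : Claim_equal_get_right_most_set_bit := by
  intro n _
  unfold Spec_get_right_most_set_bit get_right_most_set_bit get_right_most_set_bit_alt
  by_cases h : n = 0
  · subst h; decide
  · rw [dif_neg h, pv_grmsbLoop_eq n.natAbs n h rfl 1]
    ring
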